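-- pv_equiv track=rewrite | github.com/paramanandmallik/ai-powered-honeypot | agents/intelligence/intelligence_agent.py | _determine_finding_severity
-- ===== SOURCE A (Python) =====
-- from typing import Dict, List, Any, Optional, Tuple
--
-- def _determine_finding_severity(transcript_analysis: Dict[str, Any],
--                               techniques: List[Dict[str, Any]]) -> str:
--     """Determine severity of findings"""
--     # High severity indicators
--     high_severity_techniques = ["T1068", "T1055", "T1003", "T1041"]  # Exploitation, injection, credential dumping, exfiltration
--     medium_severity_techniques = ["T1548", "T1053", "T1543"]  # Privilege escalation, persistence
--
--     technique_ids = [t.get("technique_id", "") for t in techniques]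
--
--     if any(tech_id in high_severity_techniques for tech_id in technique_ids):
--         return "High"
--     elif any(tech_id in medium_severity_techniques for tech_id in technique_ids):
--         return "Medium"
--     elif len(techniques) > 5:
--         return "Medium"
--     else:
--         return "Low"
-- ===== SOURCE B (Python) =====
-- def _determine_finding_severity(transcript_analysis, techniques):
--     """Determine severity of findings"""
--     rank = {"T1068": 3, "T1055": 3, "T1003": 3, "T1041": 3,
--             "T1548": 2, "T1053": 2, "T1543": 2}
--     top = max((rank.get(t.get("technique_id", ""), 0) for t in techniques), default=0)
--     if top >= 3:
--         return "High"
--     if top >= 2: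
--         return "Medium"
--     if len(techniques) > 5:
--         return "Medium"
--     return "Low"
-- ===== Notes on version B (the rewrite author's own statement) =====
-- stated objective: alternative
-- what changed: Replaced the two sequential any()-membership scans over the id list by a single max-reduction of per-technique severity ranks taken from one rank dictionary, then branched on the maximal rank.
import Mathlib
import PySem

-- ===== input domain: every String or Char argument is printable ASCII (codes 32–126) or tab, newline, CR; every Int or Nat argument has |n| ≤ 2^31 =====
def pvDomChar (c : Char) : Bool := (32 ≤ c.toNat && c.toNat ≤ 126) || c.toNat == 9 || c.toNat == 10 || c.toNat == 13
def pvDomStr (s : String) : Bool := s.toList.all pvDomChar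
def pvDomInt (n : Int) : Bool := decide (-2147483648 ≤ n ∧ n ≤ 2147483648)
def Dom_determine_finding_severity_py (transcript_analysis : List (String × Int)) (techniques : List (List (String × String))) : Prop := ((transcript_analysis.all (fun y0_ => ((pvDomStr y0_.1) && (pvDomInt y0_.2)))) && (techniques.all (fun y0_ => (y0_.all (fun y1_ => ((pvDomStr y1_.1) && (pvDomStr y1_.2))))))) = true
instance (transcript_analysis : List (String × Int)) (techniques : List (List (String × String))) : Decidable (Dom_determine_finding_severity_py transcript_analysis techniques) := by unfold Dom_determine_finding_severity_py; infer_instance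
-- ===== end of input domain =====

-- B replaces A's two sequential any()-membership scans by one max-reduction of
-- per-technique severity ranks from a single rank dictionary (objective: alternative).


-- ===== PORT A =====
def determine_finding_severity_py (transcript_analysis : List (String × Int)) (techniques : List (List (String × String))) : String :=
  let high_severity_techniques : List String := ["T1068", "T1055", "T1003", "T1041"]
  let medium_severity_techniques : List String := ["T1548", "T1053", "T1543"]
  let technique_ids := techniques.map (fun t => (PySem.Dict.mk t).getD "technique_id" "")
  if technique_ids.any (fun tech_id => high_severity_techniques.contains tech_id) then "High"
  else if technique_ids.any (fun tech_id => medium_severity_techniques.contains tech_id) then "Medium"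
  else if techniques.length > 5 then "Medium"
  else "Low"

-- ===== PORT B =====
-- B's rank dictionary
def pvRankDict : PySem.Dict String Int :=
  PySem.Dict.mk [("T1068", 3), ("T1055", 3), ("T1003", 3), ("T1041", 3),
                 ("T1548", 2), ("T1053", 2), ("T1543", 2)]

def determine_finding_severity_py_alt (transcript_analysis : List (String × Int)) (techniques : List (List (String × String))) : String :=
  -- max((rank.get(t.get("technique_id",""),0) for t in techniques), default=0)
  let top := PySem.List.maxD
    (techniques.map (fun t => pvRankDict.getD ((PySem.Dict.mk t).getD "technique_id" "") 0))
    (fun x => x) 0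
  if top ≥ 3 then "High"
  else if top ≥ 2 then "Medium"
  else if techniques.length > 5 then "Medium"
  else "Low"

-- ===== PRECONDITION & SPEC =====
def Spec_determine_finding_severity_py (transcript_analysis : List (String × Int)) (techniques : List (List (String × String))) (out : String) : Prop := out = determine_finding_severity_py_alt transcript_analysis techniques
instance (transcript_analysis : List (String × Int)) (techniques : List (List (String × String))) (out : String) : Decidable (Spec_determine_finding_severity_py transcript_analysis techniques out) := by unfold Spec_determine_finding_severity_py; infer_instance

-- ===== CLAIM (what is proved, stated in full; the proofs are below) =====
def Claim_equal_determine_finding_severity_py : Prop := ∀ (transcript_analysis : List (String × Int)) (techniques : List (List (String × String))), Dom_determine_finding_severity_py transcript_analysis techniques → Spec_determine_finding_severity_py transcript_analysis techniques (determine_finding_severity_py transcript_analysis techniques)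

-- ===== LEMMAS AND PROOFS =====

-- the rank of one id, as B looks it up
def pvRnk (s : String) : Int := pvRankDict.getD s 0

lemma pvRnk_eq (s : String) :
    pvRnk s = if s = "T1068" ∨ s = "T1055" ∨ s = "T1003" ∨ s = "T1041" then 3
      else if s = "T1548" ∨ s = "T1053" ∨ s = "T1543" then 2 else 0 := by
  simp only [pvRnk, pvRankDict, PySem.Dict.getD_eq_get?_getD, PySem.Dict.get?_mk_cons,
    beq_iff_eq]
  split_ifs <;> simp_all [PySem.Dict.get?, eq_comm]

lemma pvRnk_vals (s : String) : pvRnk s = 0 ∨ pvRnk s = 2 ∨ pvRnk s = 3 := by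
  rw [pvRnk_eq]; split_ifs <;> simp

lemma pvRnk_three (s : String) :
    (pvRnk s == 3) = (["T1068", "T1055", "T1003", "T1041"] : List String).contains s := by
  rw [pvRnk_eq]
  split_ifs with h1 h2
  · rcases h1 with rfl | rfl | rfl | rfl <;> rfl
  · rcases h2 with rfl | rfl | rfl <;> rfl
  · simp_all

lemma pvRnk_two (s : String) :
    (pvRnk s == 2) = (["T1548", "T1053", "T1543"] : List String).contains s := by
  rw [pvRnk_eq]
  split_ifs with h1 h2
  · rcases h1 with rfl | rfl | rfl | rfl <;> rfl
  · rcases h2 with rfl | rfl | rfl <;> rfl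
  · simp_all

lemma pvFoldlMax_char (t : List Int) (x : Int)
    (hx : x = 0 ∨ x = 2 ∨ x = 3) (ht : ∀ y ∈ t, y = 0 ∨ y = 2 ∨ y = 3) :
    t.foldl max x =
      if t.any (fun y => y == 3) || x == 3 then 3
      else if t.any (fun y => y == 2) || x == 2 then 2
      else x := by
  induction t generalizing x with
  | nil => rcases hx with rfl | rfl | rfl <;> simp
  | cons a t ih =>
    have ha := ht a (by simp)
    have ht' : ∀ y ∈ t, y = 0 ∨ y = 2 ∨ y = 3 := fun y hy => ht y (List.mem_cons_of_mem _ hy)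
    simp only [List.foldl_cons, List.any_cons]
    rcases ha with rfl | rfl | rfl <;> rcases hx with rfl | rfl | rfl <;>
      rw [ih _ (by norm_num) ht'] <;>
        simp [Bool.or_comm]

lemma pvMaxD_char (ts : List (List (String × String))) :
    PySem.List.maxD (ts.map (fun t => pvRnk ((PySem.Dict.mk t).getD "technique_id" ""))) (fun x => x) 0 =
      if ts.any (fun t => pvRnk ((PySem.Dict.mk t).getD "technique_id" "") == 3) then 3
      else if ts.any (fun t => pvRnk ((PySem.Dict.mk t).getD "technique_id" "") == 2) then 2
      else 0 := by
  cases ts with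
  | nil => simp [PySem.List.maxD, PySem.List.max?]
  | cons a ts =>
    simp only [List.map_cons, PySem.List.maxD, PySem.List.max?_id_cons, Option.getD_some,
      List.any_cons]
    rw [pvFoldlMax_char _ _ (by rcases pvRnk_vals ((PySem.Dict.mk a).getD "technique_id" "") with h | h | h <;> simp [h])
      (by intro y hy; simp only [List.mem_map] at hy; obtain ⟨t, _, rfl⟩ := hy; exact pvRnk_vals _)]
    simp only [List.any_map, Function.comp_def]
    rcases pvRnk_vals ((PySem.Dict.mk a).getD "technique_id" "") with h | h | h <;>
      simp [h, Bool.or_comm]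

-- ===== VERDICT (by name: the statement is the Claim_ definition above) =====
theorem determine_finding_severity_py_spec : Claim_equal_determine_finding_severity_py := by
  intro ta techniques _
  unfold Spec_determine_finding_severity_py determine_finding_severity_py determine_finding_severity_py_alt
  rw [show (fun t => pvRankDict.getD ((PySem.Dict.mk t).getD "technique_id" "") 0)
        = (fun t => pvRnk ((PySem.Dict.mk t).getD "technique_id" "")) from rfl]
  rw [pvMaxD_char]
  simp only [List.any_map, Function.comp_def, pvRnk_three, pvRnk_two]
  cases hA : techniques.any (fun t => (["T1068", "T1055", "T1003", "T1041"] : List String).contains ((PySem.Dict.mk t).getD "technique_id" "")) <;>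
  cases hB : techniques.any (fun t => (["T1548", "T1053", "T1543"] : List String).contains ((PySem.Dict.mk t).getD "technique_id" "")) <;>
    simp
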